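-- pv_equiv track=rewrite | github.com/zenithlight/advent-of-code-2017 | 6b.py | redistributed
-- ===== SOURCE A (Python) =====
-- def redistributed(values):
--     new_values = values[:]
--
--     index = new_values.index(max(new_values))
--     blocks = new_values[index]
--     new_values[index] = 0
--
--     while blocks > 0:
--         index += 1
--         index %= len(new_values)
--         new_values[index] += 1
--         blocks -= 1
--
--     return new_values
-- ===== SOURCE B (Python) =====
-- def redistributed(values):
--     n = len(values)
--     i = values.index(max(values))
--     blocks = values[i]
--     if blocks > 0:
--         q, r = divmod(blocks, n)
--     else:
--         q, r = 0, 0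
--     return [(0 if j == i else v) + q + (1 if (j - i - 1) % n < r else 0)
--             for j, v in enumerate(values)]
-- ===== Notes on version B (the rewrite author's own statement) =====
-- stated objective: faster
-- what changed: A moves the max slot's blocks one at a time in a while loop (O(max value) iterations); B computes each slot's final value in closed form with divmod: every slot gets blocks//n and the first blocks%n slots after the maximum get one extra.
-- outside the precondition, e.g. on redistributed([]): A raises ValueError, B raises ValueError
import Mathlib
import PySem

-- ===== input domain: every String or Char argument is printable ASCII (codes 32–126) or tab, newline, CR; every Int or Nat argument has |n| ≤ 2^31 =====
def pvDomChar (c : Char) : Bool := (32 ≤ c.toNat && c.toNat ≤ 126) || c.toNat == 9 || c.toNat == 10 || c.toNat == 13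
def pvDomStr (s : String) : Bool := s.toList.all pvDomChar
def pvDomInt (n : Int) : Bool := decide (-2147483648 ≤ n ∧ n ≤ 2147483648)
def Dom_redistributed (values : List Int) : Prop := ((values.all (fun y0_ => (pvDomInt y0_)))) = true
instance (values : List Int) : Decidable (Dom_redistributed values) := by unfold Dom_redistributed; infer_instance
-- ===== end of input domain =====

-- B replaces A's one-block-at-a-time while loop (O(max value) steps) by an O(n) closed form:
-- every slot gets blocks // n, and the first blocks % n slots after the maximum get one more.

-- ===== PORT A =====
-- the 'while blocks > 0' loop; fuel = blocks (the loop runs exactly blocks.toNat times)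
def redistLoopA : Nat → List Int → Int → List Int
  | 0, xs, _ => xs
  | Nat.succ b, xs, index =>
      let index' := PySem.Int.mod (index + 1) (xs.length : Int)
      let xs' := PySem.List.pySetD xs index' ((PySem.List.pyGetD xs index' 0) + 1)
      redistLoopA b xs' index'

def redistributed (values : List Int) : List Int :=
  match PySem.List.max? values (fun x => x) with
  | none => []          -- max([]) raises ValueError: excluded by Pre_
  | some m =>
    match PySem.List.index? values m with
    | none => []        -- unreachable: the maximum is a member
    | some idx =>
      let blocks := PySem.List.pyGetD values (idx : Int) 0
      let new_values := PySem.List.pySetD values (idx : Int) 0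
      redistLoopA blocks.toNat new_values (idx : Int)

-- ===== PORT B =====
def redistributed_alt (values : List Int) : List Int :=
  let n : Int := values.length
  match PySem.List.max? values (fun x => x) with
  | none => []          -- max([]) raises ValueError: excluded by Pre_
  | some m =>
    match PySem.List.index? values m with
    | none => []        -- unreachable: the maximum is a member
    | some i0 =>
      let i : Int := i0
      let blocks := PySem.List.pyGetD values i 0
      let qr : Int × Int :=
        if blocks > 0 then (PySem.Int.floordiv blocks n, PySem.Int.mod blocks n) else (0, 0)
      (PySem.List.enumerate values 0).map (fun jv =>
        (if jv.1 = i then 0 else jv.2) + qr.1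
          + (if PySem.Int.mod (jv.1 - i - 1) n < qr.2 then 1 else 0))

-- ===== PRECONDITION & SPEC =====
-- Pre_ excludes only the empty list, on which A raises ValueError (max of empty sequence).
def Pre_redistributed (values : List Int) : Prop := values ≠ []
instance (values : List Int) : Decidable (Pre_redistributed values) := by
  unfold Pre_redistributed; infer_instance

def pvWitness_redistributed : List Int := [0, 2, 7, 0]

def Spec_redistributed (values : List Int) (out : List Int) : Prop := out = redistributed_alt values
instance (values : List Int) (out : List Int) : Decidable (Spec_redistributed values out) := by
  unfold Spec_redistributed; infer_instance

-- ===== CLAIM (what is proved, stated in full; the proofs are below) =====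
def Claim_equal_redistributed : Prop :=
  ∀ (values : List Int), Dom_redistributed values → Pre_redistributed values →
    Spec_redistributed values (redistributed values)

-- ===== LEMMAS AND PROOFS =====

-- number of times the loop, started with fuel b, increments slot j
def hits : Nat → Int → Int → Int → Int
  | 0, _, _, _ => 0
  | Nat.succ b, index, n, j =>
      (if (index + 1) % n = j then 1 else 0) + hits b ((index + 1) % n) n j

theorem redistLoopA_length (b : Nat) : ∀ (xs : List Int) (index : Int),
    (redistLoopA b xs index).length = xs.length := by
  induction b with
  | zero => intro xs index; rfl
  | succ b ih =>
      intro xs index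
      simp only [redistLoopA]
      rw [ih, PySem.List.length_pySetD]

theorem redistLoopA_getElem (b : Nat) : ∀ (xs : List Int) (index : Int) (j : Nat)
    (hne : xs ≠ []) (hj : j < xs.length),
    (redistLoopA b xs index)[j]'(by rw [redistLoopA_length]; exact hj)
      = xs[j] + hits b index (xs.length : Int) (j : Int) := by
  induction b with
  | zero => intro xs index j hne hj; simp [redistLoopA, hits]
  | succ b ih =>
      intro xs index j hne hj
      have hn : (0 : Int) < (xs.length : Int) := by
        have := List.length_pos_of_ne_nil hne; exact_mod_cast this
      have hmod : PySem.Int.mod (index + 1) (xs.length : Int)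
          = (index + 1) % (xs.length : Int) := PySem.Int.mod_eq_emod_of_pos hn
      have hi'0 : 0 ≤ (index + 1) % (xs.length : Int) := Int.emod_nonneg _ (by omega)
      have hi'n : (index + 1) % (xs.length : Int) < (xs.length : Int) :=
        Int.emod_lt_of_pos _ hn
      have hi'len : ((index + 1) % (xs.length : Int)).toNat < xs.length := by omega
      have hget : PySem.List.pyGetD xs ((index + 1) % (xs.length : Int)) 0
          = xs[((index + 1) % (xs.length : Int)).toNat] := by
        rw [PySem.List.pyGetD_of_nonneg xs 0 hi'0, List.getD_eq_getElem _ _ hi'len]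
      have hset : PySem.List.pySetD xs ((index + 1) % (xs.length : Int))
            (PySem.List.pyGetD xs ((index + 1) % (xs.length : Int)) 0 + 1)
          = xs.set ((index + 1) % (xs.length : Int)).toNat
            (xs[((index + 1) % (xs.length : Int)).toNat] + 1) := by
        rw [PySem.List.pySetD_of_nonneg xs _ hi'0, hget]
      simp only [redistLoopA, hmod, hset]
      have hne' : xs.set ((index + 1) % (xs.length : Int)).toNat
          (xs[((index + 1) % (xs.length : Int)).toNat] + 1) ≠ [] := by
        intro h; apply hne; simpa using congrArg List.length h
      have hj' : j < (xs.set ((index + 1) % (xs.length : Int)).toNat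
          (xs[((index + 1) % (xs.length : Int)).toNat] + 1)).length := by simpa using hj
      rw [ih _ ((index + 1) % (xs.length : Int)) j hne' hj']
      have hlen' : ((xs.set ((index + 1) % (xs.length : Int)).toNat
          (xs[((index + 1) % (xs.length : Int)).toNat] + 1)).length : Int)
          = (xs.length : Int) := by simp
      rw [hlen', List.getElem_set]
      simp only [hits]
      by_cases hcase : (index + 1) % (xs.length : Int) = (j : Int)
      · have h2 : ((index + 1) % (xs.length : Int)).toNat = j := by omega
        rw [if_pos h2, if_pos hcase]
        simp only [hcase, Int.toNat_natCast]
        ring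
      · have h2 : ¬ ((index + 1) % (xs.length : Int)).toNat = j := by omega
        simp only [if_neg hcase, if_neg h2]
        ring

-- closed form for hits
theorem hits_closed (n : Int) (hn : 0 < n) (j : Int) (hj0 : 0 ≤ j) (hjn : j < n) :
    ∀ (b : Nat) (index : Int),
      hits b index n j
        = (b : Int) / n + (if (j - index - 1) % n < (b : Int) % n then 1 else 0) := by
  intro b
  induction b with
  | zero =>
      intro index
      have h0 : 0 ≤ (j - index - 1) % n := Int.emod_nonneg _ (by omega)
      simp [hits]
      omega
  | succ b ih =>
      intro index
      simp only [hits, ih ((index + 1) % n)]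
      have hd0 : 0 ≤ (j - index - 1) % n := Int.emod_nonneg _ (by omega)
      have hdn : (j - index - 1) % n < n := Int.emod_lt_of_pos _ hn
      have hjmod : j % n = j := Int.emod_eq_of_lt hj0 hjn
      -- i' = j ↔ d = 0
      have heq : ((index + 1) % n = j) ↔ ((j - index - 1) % n = 0) := by
        constructor
        · intro h
          have h2 : (index + 1) % n = j % n := by rw [hjmod]; exact h
          rw [Int.emod_eq_emod_iff_emod_sub_eq_zero] at h2
          have hdvd : n ∣ (index + 1 - j) := Int.dvd_of_emod_eq_zero h2
          have hdvd2 : n ∣ (j - index - 1) := by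
            have h3 := (dvd_neg (α := Int)).mpr hdvd
            have h4 : -(index + 1 - j) = j - index - 1 := by ring
            rwa [h4] at h3
          exact Int.emod_eq_zero_of_dvd hdvd2
        · intro h
          have hdvd : n ∣ (j - index - 1) := Int.dvd_of_emod_eq_zero h
          have hdvd2 : n ∣ (index + 1 - j) := by
            have h3 := (dvd_neg (α := Int)).mpr hdvd
            have h4 : -(j - index - 1) = index + 1 - j := by ring
            rwa [h4] at h3
          have h5 : (index + 1) % n = j % n :=
            Int.emod_eq_emod_iff_emod_sub_eq_zero.mpr (Int.emod_eq_zero_of_dvd hdvd2)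
          rw [h5, hjmod]
      -- (j - i' - 1) % n = (d - 1) % n
      have hshift : (j - (index + 1) % n - 1) % n = ((j - index - 1) % n - 1) % n := by
        apply Int.emod_eq_emod_iff_emod_sub_eq_zero.mpr
        apply Int.emod_eq_zero_of_dvd
        have hdvd1 : n ∣ (j - index - 1 - (j - index - 1) % n) :=
          ⟨(j - index - 1) / n, by rw [Int.emod_def]; ring⟩
        have hdvd2 : n ∣ (index + 1 - (index + 1) % n) :=
          ⟨(index + 1) / n, by rw [Int.emod_def]; ring⟩
        have h4 : (j - (index + 1) % n - 1) - ((j - index - 1) % n - 1)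
            = (j - index - 1 - (j - index - 1) % n) + (index + 1 - (index + 1) % n) := by
          ring
        rw [h4]; exact dvd_add hdvd1 hdvd2
      -- value of (d - 1) % n
      have hdm1 : ((j - index - 1) % n - 1) % n
          = if (j - index - 1) % n = 0 then n - 1 else (j - index - 1) % n - 1 := by
        by_cases h : (j - index - 1) % n = 0
        · rw [if_pos h, h]
          have h2 : (0 - 1 : Int) = (n - 1) + n * (-1) := by ring
          rw [h2, Int.add_mul_emod_self_left]
          exact Int.emod_eq_of_lt (by omega) (by omega)
        · rw [if_neg h]
          exact Int.emod_eq_of_lt (by omega) (by omega)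
      -- div/mod of b and b+1
      have hbqr : (b : Int) % n + n * ((b : Int) / n) = (b : Int) := by
        rw [Int.emod_def]; ring
      have hr0 : 0 ≤ (b : Int) % n := Int.emod_nonneg _ (by omega)
      have hrn : (b : Int) % n < n := Int.emod_lt_of_pos _ hn
      have hsucc : ((b + 1 : Nat) : Int) = (b : Int) + 1 := by push_cast; ring
      have hnext : ((b : Int) + 1) / n
            = (if (b : Int) % n + 1 = n then (b : Int) / n + 1 else (b : Int) / n)
          ∧ ((b : Int) + 1) % n
            = (if (b : Int) % n + 1 = n then 0 else (b : Int) % n + 1) := by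
        by_cases h : (b : Int) % n + 1 = n
        · rw [if_pos h, if_pos h]
          have hmul : n * ((b : Int) / n + 1) = n * ((b : Int) / n) + n := by ring
          have h2 := (Int.ediv_emod_unique (a := (b : Int) + 1) (b := n)
            (r := 0) (q := (b : Int) / n + 1) hn).mpr ⟨by omega, le_refl 0, hn⟩
          exact ⟨h2.1, h2.2⟩
        · rw [if_neg h, if_neg h]
          have h2 := (Int.ediv_emod_unique (a := (b : Int) + 1) (b := n)
            (r := (b : Int) % n + 1) (q := (b : Int) / n) hn).mpr
            ⟨by omega, by omega, by omega⟩
          exact ⟨h2.1, h2.2⟩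
      rw [hshift, hdm1, hsucc, hnext.1, hnext.2]
      by_cases hdz : (j - index - 1) % n = 0
      · rw [if_pos (heq.mpr hdz), if_pos hdz, hdz]
        split_ifs <;> omega
      · rw [if_neg (fun h => hdz (heq.mp h)), if_neg hdz]
        split_ifs <;> omega

-- the two ports agree on nonempty lists
theorem main_eq (values : List Int) (hne : values ≠ []) :
    redistributed values = redistributed_alt values := by
  have hlen : 0 < values.length := List.length_pos_of_ne_nil hne
  have hn : (0 : Int) < (values.length : Int) := by exact_mod_cast hlen
  obtain ⟨m, hm⟩ : ∃ m, PySem.List.max? values (fun x => x) = some m := by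
    cases h : PySem.List.max? values (fun x => x) with
    | none => exact absurd ((PySem.List.max?_eq_none_iff values _).mp h) hne
    | some m => exact ⟨m, rfl⟩
  have hmem : m ∈ values := PySem.List.max?_mem hm
  obtain ⟨idx, hidx⟩ : ∃ idx, PySem.List.index? values m = some idx := by
    cases h : PySem.List.index? values m with
    | none =>
        rw [PySem.List.index?_eq_idxOf?] at h
        exact absurd hmem (List.idxOf?_eq_none_iff.mp h)
    | some i => exact ⟨i, rfl⟩
  have hidx' := hidx
  rw [PySem.List.index?_eq_idxOf?, List.idxOf?_eq_some_iff] at hidx'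
  obtain ⟨hidxlt, hval, _⟩ := hidx'
  have hblocks : PySem.List.pyGetD values ((idx : Nat) : Int) 0 = m := by
    rw [PySem.List.pyGetD_of_nonneg values 0 (by exact_mod_cast Int.natCast_nonneg idx)]
    rw [Int.toNat_natCast, List.getD_eq_getElem _ _ hidxlt, hval]
  have hset : PySem.List.pySetD values ((idx : Nat) : Int) 0 = values.set idx 0 := by
    rw [PySem.List.pySetD_of_nonneg values 0 (by exact_mod_cast Int.natCast_nonneg idx)]
    rw [Int.toNat_natCast]
  unfold redistributed redistributed_alt
  simp only [hm, hidx, hblocks, hset]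
  apply List.ext_getElem
  · rw [redistLoopA_length]
    simp [PySem.List.length_enumerate]
  · intro j hj1 hj2
    have hjlen : j < values.length := by
      have h := hj1; rw [redistLoopA_length] at h; simpa using h
    have hsetne : values.set idx 0 ≠ [] := by
      intro h; apply hne; simpa using congrArg List.length h
    rw [redistLoopA_getElem _ _ _ _ hsetne (by simpa using hjlen)]
    have hlem : ((values.set idx 0).length : Int) = (values.length : Int) := by simp
    rw [hlem]
    rw [List.getElem_map, PySem.List.getElem_enumerate values 0 j (by
      simpa [PySem.List.length_enumerate] using hjlen)]
    simp only [zero_add]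
    rw [List.getElem_set]
    by_cases hmpos : m > 0
    · rw [if_pos hmpos]
      have hq : PySem.Int.floordiv m (values.length : Int) = m / (values.length : Int) :=
        PySem.Int.floordiv_eq_ediv_of_pos hn
      have hr : PySem.Int.mod m (values.length : Int) = m % (values.length : Int) :=
        PySem.Int.mod_eq_emod_of_pos hn
      have hmm : PySem.Int.mod ((j : Int) - idx - 1) (values.length : Int)
          = ((j : Int) - idx - 1) % (values.length : Int) :=
        PySem.Int.mod_eq_emod_of_pos hn
      rw [hits_closed (values.length : Int) hn (j : Int) (by exact_mod_cast Nat.zero_le j)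
        (by exact_mod_cast hjlen) m.toNat (idx : Int)]
      have hcast : ((m.toNat : Nat) : Int) = m := Int.toNat_of_nonneg (by omega)
      rw [hcast, hq, hr, hmm]
      by_cases hje : (idx : Nat) = j
      · have h2 : ((j : Nat) : Int) = ((idx : Nat) : Int) := by exact_mod_cast hje.symm
        simp only [if_pos hje, if_pos h2]
        ring
      · have h2 : ¬ ((j : Nat) : Int) = ((idx : Nat) : Int) := by
          intro h; exact hje (by exact_mod_cast h.symm)
        simp only [if_neg hje, if_neg h2]
        ring
    · rw [if_neg hmpos]
      have hm0 : m.toNat = 0 := by omega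
      rw [hm0]
      simp only [hits]
      have hmod0 : 0 ≤ PySem.Int.mod ((j : Int) - idx - 1) (values.length : Int) := by
        rw [PySem.Int.mod_eq_emod_of_pos hn]; exact Int.emod_nonneg _ (by omega)
      have hnotlt : ¬ PySem.Int.mod ((j : Int) - idx - 1) (values.length : Int) < 0 := by
        omega
      rw [if_neg hnotlt]
      by_cases hje : (idx : Nat) = j
      · have h2 : ((j : Nat) : Int) = ((idx : Nat) : Int) := by exact_mod_cast hje.symm
        simp [hje, h2]
      · have h2 : ¬ ((j : Nat) : Int) = ((idx : Nat) : Int) := by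
          intro h; exact hje (by exact_mod_cast h.symm)
        simp [hje, h2]

-- ===== VERDICT (by name: the statement is the Claim_ definition above) =====
theorem redistributed_spec : Claim_equal_redistributed := by
  intro values _ hpre
  unfold Spec_redistributed
  exact main_eq values hpre
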